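-- pv_equiv track=rewrite | github.com/ket0825/baekjoon_algorithm | retry/candy_game3085.py | count_consecutive_color_row
-- ===== SOURCE A (Python) =====
-- def count_consecutive_color_row(mat: list[list[str]],
--                                 index_checklist: list[int],
--                                 ) -> list[int]:
--     consecutive_color_count_list = []
--     for rownum in index_checklist:
--         consecutive_color_count = 0
--         cur_color = None
--         prev_color = None
--         for col in mat[rownum]:
--             cur_color = col
--             if cur_color != prev_color and prev_color != None:
--                 consecutive_color_count_list.append(consecutive_color_count)
--                 consecutive_color_count = 1
--                 prev_color = cur_color
--             else:
--                 prev_color = cur_color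
--                 consecutive_color_count+=1
--         consecutive_color_count_list.append(consecutive_color_count)
--
--     return consecutive_color_count_list
-- ===== SOURCE B (Python) =====
-- def count_consecutive_color_row(mat: list[list[str]],
--                                 index_checklist: list[int],
--                                 ) -> list[int]:
--     res = []
--     for rownum in index_checklist:
--         row = mat[rownum]
--         if not row:
--             res.append(0)
--             continue
--         while row:
--             k = 1
--             while k < len(row) and row[k] == row[0]:
--                 k += 1
--             res.append(k)
--             row = row[k:]
--     return res
-- ===== Notes on version B (the rewrite author's own statement) =====
-- stated objective: alternative
-- what changed: Replaces A's prev/cur/counter state machine (flushing a pending count on every color change) with a chop-off-the-leading-run loop: measure the leading run of equal colors, append its length, slice it off, repeat; the empty row appends 0 directly.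
import Mathlib
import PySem

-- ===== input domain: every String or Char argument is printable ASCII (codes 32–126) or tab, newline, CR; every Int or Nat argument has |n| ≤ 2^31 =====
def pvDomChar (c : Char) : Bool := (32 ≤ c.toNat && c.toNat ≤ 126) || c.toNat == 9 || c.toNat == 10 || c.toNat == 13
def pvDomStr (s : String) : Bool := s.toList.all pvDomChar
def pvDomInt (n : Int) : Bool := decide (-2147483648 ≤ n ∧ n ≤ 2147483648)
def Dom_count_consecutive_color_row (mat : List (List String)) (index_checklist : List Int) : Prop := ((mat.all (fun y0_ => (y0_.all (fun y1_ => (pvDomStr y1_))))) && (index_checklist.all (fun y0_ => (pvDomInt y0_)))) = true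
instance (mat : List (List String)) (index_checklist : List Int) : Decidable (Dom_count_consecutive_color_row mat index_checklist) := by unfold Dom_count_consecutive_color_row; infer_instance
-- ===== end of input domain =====

-- B replaces A's prev/cur/counter state machine with a chop-off-the-leading-run loop (alternative decomposition, same cost).


-- ===== PORT A =====
-- inner loop state: (consecutive_color_count_list, consecutive_color_count, prev_color)
def pvAStep (s : List Int × Int × Option String) (col : String) : List Int × Int × Option String :=
  let (lst, cnt, prev) := s
  if some col ≠ prev ∧ prev ≠ none then (lst ++ [cnt], 1, some col)
  else (lst, cnt + 1, some col)

-- one iteration of the outer loop: run the inner loop over the row, then append the final count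
def pvARow (acc : List Int) (row : List String) : List Int :=
  let st := row.foldl pvAStep (acc, 0, none)
  st.1 ++ [st.2.1]

-- mat[rownum] raises IndexError when out of range; Pre_ excludes that, so the default [] is never reached under the claim
def count_consecutive_color_row (mat : List (List String)) (index_checklist : List Int) : List Int :=
  index_checklist.foldl (fun acc rownum => pvARow acc ((PySem.List.pyGet? mat rownum).getD [])) []

-- ===== PORT B =====
-- the inner 'while k < len(row) and row[k] == row[0]: k += 1': counts the leading elements of the tail equal to row[0]
def pvBRun (c : String) : List String → Nat
  | [] => 0
  | x :: xs => if x = c then pvBRun c xs + 1 else 0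

-- the outer 'while row:' loop: append the leading-run length k, continue on row[k:] (= List.drop, k ≤ len(row))
def pvBLoop : List String → List Int
  | [] => []
  | c :: rest =>
      let k := pvBRun c rest
      ((k : Int) + 1) :: pvBLoop (rest.drop k)
  termination_by l => l.length
  decreasing_by simp

def pvBRow (acc : List Int) (row : List String) : List Int :=
  if row.isEmpty then acc ++ [0] else acc ++ pvBLoop row

def count_consecutive_color_row_alt (mat : List (List String)) (index_checklist : List Int) : List Int :=
  index_checklist.foldl (fun acc rownum => pvBRow acc ((PySem.List.pyGet? mat rownum).getD [])) []

-- ===== PRECONDITION & SPEC =====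
-- A raises IndexError on mat[rownum] out of range (so does B); Pre_ excludes exactly those inputs
def Pre_count_consecutive_color_row (mat : List (List String)) (index_checklist : List Int) : Prop :=
  ∀ i ∈ index_checklist, PySem.Raise.InRange mat.length i
instance (mat : List (List String)) (index_checklist : List Int) : Decidable (Pre_count_consecutive_color_row mat index_checklist) := by unfold Pre_count_consecutive_color_row; infer_instance
def pvWitness_count_consecutive_color_row : List (List String) × List Int :=
  ([["a", "a", "b"], []], [0, 1, -1])
def Spec_count_consecutive_color_row (mat : List (List String)) (index_checklist : List Int) (out : List Int) : Prop := out = count_consecutive_color_row_alt mat index_checklist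
instance (mat : List (List String)) (index_checklist : List Int) (out : List Int) : Decidable (Spec_count_consecutive_color_row mat index_checklist out) := by unfold Spec_count_consecutive_color_row; infer_instance

-- ===== CLAIM (what is proved, stated in full; the proofs are below) =====
def Claim_equal_count_consecutive_color_row : Prop := ∀ (mat : List (List String)) (index_checklist : List Int), Dom_count_consecutive_color_row mat index_checklist → Pre_count_consecutive_color_row mat index_checklist → Spec_count_consecutive_color_row mat index_checklist (count_consecutive_color_row mat index_checklist)

-- ===== LEMMAS AND PROOFS =====

-- mid-run invariant: from state (acc, cnt, some c), A's fold finishes the current run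
-- (absorbing the leading pvBRun c l equal elements) and then behaves like pvBLoop on the remainder
theorem pvBLoop_nil : pvBLoop [] = [] := by rw [pvBLoop.eq_def]

theorem pvBLoop_cons (c : String) (rest : List String) :
    pvBLoop (c :: rest) = ((pvBRun c rest : Int) + 1) :: pvBLoop (rest.drop (pvBRun c rest)) := by
  rw [pvBLoop.eq_def]

theorem pvA_fold_run (l : List String) (c : String) (cnt : Int) (acc : List Int) :
    (let st := l.foldl pvAStep (acc, cnt, some c)
     st.1 ++ [st.2.1]) = acc ++ (cnt + (pvBRun c l : Int)) :: pvBLoop (l.drop (pvBRun c l)) := by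
  induction l generalizing c cnt acc with
  | nil => simp [pvBRun, pvBLoop_nil]
  | cons x xs ih =>
    by_cases hx : x = c
    · subst hx
      have h := ih x (cnt + 1) acc
      simp only [List.foldl_cons, pvAStep]
      rw [if_neg (by simp)]
      simp only at h
      rw [h]
      have hr : pvBRun x (x :: xs) = pvBRun x xs + 1 := by simp [pvBRun]
      rw [hr, List.drop_succ_cons]
      push_cast
      ring_nf
    · have h := ih x 1 (acc ++ [cnt])
      have hr : pvBRun c (x :: xs) = 0 := by simp [pvBRun, hx]
      rw [hr]
      simp only [List.foldl_cons, pvAStep]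
      rw [if_pos ⟨by simpa using hx, by simp⟩]
      simp only at h
      rw [h, List.drop_zero, pvBLoop_cons]
      simp [add_comm]

-- one outer iteration: A's row processing equals B's
theorem pvRow_eq (acc : List Int) (row : List String) : pvARow acc row = pvBRow acc row := by
  cases row with
  | nil => simp [pvARow, pvBRow]
  | cons c xs =>
    have h := pvA_fold_run xs c 1 acc
    simp only [pvARow, List.foldl_cons, pvAStep]
    rw [if_neg (by simp)]
    simp only at h
    norm_num
    rw [h, pvBRow, pvBLoop_cons]
    simp [add_comm]

theorem pvFold_eq (idx : List Int) (mat : List (List String)) (acc : List Int) :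
    idx.foldl (fun acc rownum => pvARow acc ((PySem.List.pyGet? mat rownum).getD [])) acc
      = idx.foldl (fun acc rownum => pvBRow acc ((PySem.List.pyGet? mat rownum).getD [])) acc := by
  induction idx generalizing acc with
  | nil => rfl
  | cons i is ih => rw [List.foldl_cons, List.foldl_cons, pvRow_eq]; exact ih _

-- ===== VERDICT (by name: the statement is the Claim_ definition above) =====
theorem count_consecutive_color_row_spec : Claim_equal_count_consecutive_color_row := by
  intro mat idx _ _
  unfold Spec_count_consecutive_color_row count_consecutive_color_row count_consecutive_color_row_alt
  exact pvFold_eq idx mat []
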